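-- pv_equiv track=rewrite | github.com/nziegler87/FoundationsOfCompSci | Homework/HW4/football_functions.py | sum_points
-- ===== SOURCE A (Python) =====
-- GAMES_IN_SEASON = 38
--
-- WIN_POINTS = 3
--
-- DRAW_POINTS = 1
--
-- LOSS_POINTS = 0
--
-- def sum_points(result_list, season, game_number):
--     ''' Name: sum_points
--         Input: list of results, each item as a string;
--                season and game_number - ints
--         Returns: number of points up to season and game_number as int
--     '''
--     # Convert season and game_number to total games played
--     game = (season - 1) * GAMES_IN_SEASON
--     game += game_number
--
--     # Copy result_list up to games played
--     short_list = result_list[:game]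
--     total = 0
--
--     # Iterate through list, adding point values based on result
--     for i in short_list:
--         if i == "W":
--             total += WIN_POINTS
--         elif i == "D":
--             total += DRAW_POINTS
--         else:
--             total += LOSS_POINTS
--
--     return total
-- ===== SOURCE B (Python) =====
-- GAMES_IN_SEASON = 38
-- WIN_POINTS = 3
-- DRAW_POINTS = 1
-- LOSS_POINTS = 0
--
-- POINTS = {"W": WIN_POINTS, "D": DRAW_POINTS}
--
-- def sum_points(result_list, season, game_number):
--     # Build a cumulative points table for the whole history once,
--     # then answer with a single indexed lookup at the slice boundary.
--     prefix = [0]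
--     for result in result_list:
--         prefix.append(prefix[-1] + POINTS.get(result, LOSS_POINTS))
--     games = len(result_list[:(season - 1) * GAMES_IN_SEASON + game_number])
--     return prefix[games]
-- ===== Notes on version B (the rewrite author's own statement) =====
-- stated objective: alternative
-- what changed: Instead of accumulating points in a conditional loop over the slice, B precomputes a cumulative-points prefix table over the whole list with a dict lookup table and answers with a single indexed lookup at the slice boundary.
import Mathlib
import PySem

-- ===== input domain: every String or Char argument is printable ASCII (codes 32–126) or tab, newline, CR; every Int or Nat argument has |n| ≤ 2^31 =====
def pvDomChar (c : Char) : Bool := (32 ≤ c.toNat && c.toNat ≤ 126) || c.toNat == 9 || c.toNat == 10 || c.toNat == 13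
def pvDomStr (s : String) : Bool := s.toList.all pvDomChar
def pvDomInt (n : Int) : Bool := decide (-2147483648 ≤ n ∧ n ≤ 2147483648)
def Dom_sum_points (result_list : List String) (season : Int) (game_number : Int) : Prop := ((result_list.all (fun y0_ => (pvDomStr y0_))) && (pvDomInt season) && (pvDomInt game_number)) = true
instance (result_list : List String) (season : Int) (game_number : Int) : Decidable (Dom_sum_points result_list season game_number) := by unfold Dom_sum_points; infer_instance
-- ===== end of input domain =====

-- B replaces A's conditional accumulation over the slice with a precomputed cumulative-points prefix table (dict lookup per result) and a single indexed lookup at the slice boundary; alternative decomposition, same order of cost.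


-- ===== PORT A =====
def sum_points (result_list : List String) (season : Int) (game_number : Int) : Int :=
  let game := (season - 1) * 38 + game_number
  let short_list := PySem.List.slice result_list none (some game)
  short_list.foldl (fun total i =>
    if i == "W" then total + 3
    else if i == "D" then total + 1
    else total + 0) 0

-- ===== PORT B =====
def pvPOINTS : PySem.Dict String Int := PySem.Dict.ofList [("W", 3), ("D", 1)]

-- prefix[-1] and prefix[games] are always in range (prefix starts as [0] and only grows;
-- games = len(slice) ≤ len(result_list) < len(prefix)), so pyGetD with default 0 is exact here.
def sum_points_alt (result_list : List String) (season : Int) (game_number : Int) : Int :=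
  let prefx := result_list.foldl
    (fun pre result => pre ++ [PySem.List.pyGetD pre (-1) 0 + pvPOINTS.getD result 0]) [0]
  let games := (PySem.List.slice result_list none (some ((season - 1) * 38 + game_number))).length
  PySem.List.pyGetD prefx (games : Int) 0

-- ===== PRECONDITION & SPEC =====
def Spec_sum_points (result_list : List String) (season : Int) (game_number : Int) (out : Int) : Prop := out = sum_points_alt result_list season game_number
instance (result_list : List String) (season : Int) (game_number : Int) (out : Int) : Decidable (Spec_sum_points result_list season game_number out) := by unfold Spec_sum_points; infer_instance

-- ===== CLAIM (what is proved, stated in full; the proofs are below) =====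
def Claim_equal_sum_points : Prop := ∀ (result_list : List String) (season : Int) (game_number : Int), Dom_sum_points result_list season game_number → Spec_sum_points result_list season game_number (sum_points result_list season game_number)

-- ===== LEMMAS AND PROOFS =====

-- points of one result
def pvPts (r : String) : Int := if r = "W" then 3 else if r = "D" then 1 else 0

theorem pvPOINTS_getD (r : String) : pvPOINTS.getD r 0 = pvPts r := by
  by_cases hw : r = "W" <;> by_cases hd : r = "D" <;>
    simp [pvPOINTS, pvPts, hw, hd, PySem.Dict.ofList, PySem.Dict.update,
      PySem.Dict.getD_insert, PySem.Dict.getD_empty]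

-- the tail of the running prefix-sum starting from x
def pvScan (x : Int) : List String → List Int
  | [] => []
  | r :: rs => (x + pvPts r) :: pvScan (x + pvPts r) rs

theorem prefx_fold_eq (l : List String) (pre : List Int) (x : Int) :
    l.foldl (fun pre result => pre ++ [PySem.List.pyGetD pre (-1) 0 + pvPOINTS.getD result 0])
      (pre ++ [x]) = (pre ++ [x]) ++ pvScan x l := by
  induction l generalizing pre x with
  | nil => simp [pvScan]
  | cons r rs ih =>
    simp only [List.foldl_cons, PySem.List.pyGetD_neg_one_append_singleton]
    rw [pvPOINTS_getD r, ih (pre ++ [x]) (x + pvPts r)]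
    simp [pvScan]

theorem pvScan_getElem? (l : List String) (x : Int) (m : Nat) (hm : m ≤ l.length) :
    (x :: pvScan x l)[m]? = some (x + ((l.take m).map pvPts).sum) := by
  induction l generalizing x m with
  | nil =>
    have h0 : m = 0 := by simpa using hm
    subst h0; simp
  | cons r rs ih =>
    cases m with
    | zero => simp
    | succ m' =>
      simp only [pvScan, List.getElem?_cons_succ, List.take_succ_cons, List.map_cons,
        List.sum_cons]
      rw [ih (x + pvPts r) m' (by simpa using hm)]
      ring_nf

-- A's fold equals the points-sum of the list
theorem foldA_eq (l : List String) (a : Int) :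
    l.foldl (fun total i =>
      if i == "W" then total + 3
      else if i == "D" then total + 1
      else total + 0) a = a + (l.map pvPts).sum := by
  induction l generalizing a with
  | nil => simp
  | cons x xs ih =>
    simp only [List.foldl_cons, ih, List.map_cons, List.sum_cons, pvPts]
    by_cases hw : x = "W"
    · simp [hw]; ring
    · by_cases hd : x = "D"
      · simp [hd]; ring
      · simp [hw, hd]

-- the slice result_list[:g] is a prefix: take of some m
theorem slice_to_eq_take (xs : List String) (g : Int) :
    ∃ m : Nat, PySem.List.slice xs none (some g) = xs.take m := by
  by_cases hg : 0 ≤ g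
  · exact ⟨g.toNat, PySem.List.slice_to xs hg⟩
  · refine ⟨xs.length - (-g).toNat, ?_⟩
    have hk : 0 < (-g).toNat := by omega
    have hg2 : g = -((-g).toNat : Int) := by omega
    conv_lhs => rw [hg2]
    exact PySem.List.slice_to_neg_natCast xs _ hk

-- ===== VERDICT (by name: the statement is the Claim_ definition above) =====
theorem sum_points_spec : Claim_equal_sum_points := by
  intro result_list season game_number _
  unfold Spec_sum_points sum_points sum_points_alt
  obtain ⟨m, hm⟩ := slice_to_eq_take result_list ((season - 1) * 38 + game_number)
  rw [hm, foldA_eq]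
  have hfold : result_list.foldl
      (fun pre result => pre ++ [PySem.List.pyGetD pre (-1) 0 + pvPOINTS.getD result 0]) [0]
      = (0 : Int) :: pvScan 0 result_list := by
    simpa using prefx_fold_eq result_list [] 0
  rw [hfold, PySem.List.pyGetD_natCast]
  have hlen : (result_list.take m).length ≤ result_list.length := by
    simp [List.length_take]
  have hget := pvScan_getElem? result_list 0 (result_list.take m).length hlen
  have htake : result_list.take (result_list.take m).length = result_list.take m := by
    rw [List.length_take]
    rcases Nat.le_total m result_list.length with h | h
    · rw [Nat.min_eq_left h]
    · rw [Nat.min_eq_right h, List.take_length, List.take_of_length_le h]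
  rw [htake] at hget
  simp only [List.getD, hget, Option.getD_some, zero_add, hm]
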